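-- pv_equiv track=rewrite | github.com/dylantzx/HackerRank | Problem Solving/Implementation/DayOfTheProgrammer.py | dayOfProgrammer
-- ===== SOURCE A (Python) =====
-- def dayOfProgrammer(year):
--     calendar = [31,28,31,30,31,30,31,31,30,31,30,31]
--     daysInyear = [sum(calendar[:month+1]) for month in range(len(calendar))]
--     leap = checkLeapYear(year)
--     date = []
--     for days in daysInyear[::-1]:
--         if days < 256:
--             day_count = 256 - days
--             if leap ==1:
--                 day_count -=1
--             elif leap ==2:
--                 day_count = 256 + 13 - days
--             date.append(day_count)
--             date.append(daysInyear.index(days)+2)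
--             date.append(year)
--             break
--     if date[1]<10:
--         date_str =f"{date[0]}.0{date[1]}.{date[2]}"
--     else:
--         date_str = f"{date[0]}.{date[1]}.{date[2]}"
--     return date_str
--
-- def checkLeapYear(year):
--     leap = 0
--     if 1700<=year<=1917 and year%4 ==0:
--         leap = 1
--     elif year>=1919 and (year%400==0 or (year%4==0 and year%100!=0)):
--         leap = 1
--     elif year==1918:
--         leap = 2
--     return leap
-- ===== SOURCE B (Python) =====
-- def checkLeapYear(year):
--     leap = 0
--     if 1700<=year<=1917 and year%4 ==0:
--         leap = 1
--     elif year>=1919 and (year%400==0 or (year%4==0 and year%100!=0)):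
--         leap = 1
--     elif year==1918:
--         leap = 2
--     return leap
--
-- def dayOfProgrammer(year):
--     # closed form: day 256 always falls in September (August ends on day 243/244)
--     leap = checkLeapYear(year)
--     day = 12 if leap == 1 else 26 if leap == 2 else 13
--     return f"{day}.09.{year}"
-- ===== Notes on version B (the rewrite author's own statement) =====
-- stated objective: simpler
-- what changed: Replaced the cumulative month-length table, the reversed linear search with break, list.index and the zero-padding branch by the closed form the loop always computes: the day-of-the-programmer is always in September, with the day number picked directly from the leap classification and a constant zero-padded month.
import Mathlib
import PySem

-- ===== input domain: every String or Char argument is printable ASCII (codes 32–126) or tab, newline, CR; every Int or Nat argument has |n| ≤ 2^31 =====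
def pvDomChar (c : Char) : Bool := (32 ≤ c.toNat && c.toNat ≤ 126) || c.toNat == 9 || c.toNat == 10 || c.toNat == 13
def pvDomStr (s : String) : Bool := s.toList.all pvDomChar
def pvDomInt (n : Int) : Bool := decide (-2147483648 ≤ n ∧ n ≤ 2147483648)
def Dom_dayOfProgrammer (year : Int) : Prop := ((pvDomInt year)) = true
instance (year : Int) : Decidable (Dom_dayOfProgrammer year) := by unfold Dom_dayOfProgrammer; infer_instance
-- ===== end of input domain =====

-- B replaces A's cumulative-table + reversed search with the closed form (day 12/26/13, month 09).
-- ===== PORT A =====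
-- helper checkLeapYear, shared verbatim by both Pythons
def checkLeapYear (year : Int) : Int :=
  if 1700 ≤ year ∧ year ≤ 1917 ∧ PySem.Int.mod year 4 = 0 then 1
  else if year ≥ 1919 ∧ (PySem.Int.mod year 400 = 0 ∨ (PySem.Int.mod year 4 = 0 ∧ PySem.Int.mod year 100 ≠ 0)) then 1
  else if year = 1918 then 2
  else 0

-- the 'for days in daysInyear[::-1]: … break' loop; returns the 'date' list built before break
def loopA (leap year : Int) (daysInyear : List Int) : List Int → List Int
  | [] => []
  | days :: rest =>
    if days < 256 then
      let day_count := 256 - days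
      let day_count := if leap = 1 then day_count - 1
                       else if leap = 2 then 256 + 13 - days
                       else day_count
      [day_count, ((PySem.List.index? daysInyear days).getD 0 : Int) + 2, year]
    else loopA leap year daysInyear rest

def dayOfProgrammer (year : Int) : String :=
  let calendar : List Int := [31,28,31,30,31,30,31,31,30,31,30,31]
  let daysInyear := (List.range calendar.length).map
    (fun month => (PySem.List.slice calendar none (some ((month : Int) + 1))).sum)
  let leap := checkLeapYear year
  let date := loopA leap year daysInyear daysInyear.reverse
  -- date always has exactly 3 elements (31 < 256, so the loop always breaks);
  -- the [] case corresponds to Python's IndexError at date[1], which is unreachable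
  match date with
  | [d0, d1, d2] =>
    if d1 < 10 then PySem.Int.toStr d0 ++ ".0" ++ PySem.Int.toStr d1 ++ "." ++ PySem.Int.toStr d2
    else PySem.Int.toStr d0 ++ "." ++ PySem.Int.toStr d1 ++ "." ++ PySem.Int.toStr d2
  | _ => ""

-- ===== PORT B =====
def dayOfProgrammer_alt (year : Int) : String :=
  let leap := checkLeapYear year
  let day : Int := if leap = 1 then 12 else if leap = 2 then 26 else 13
  PySem.Int.toStr day ++ ".09." ++ PySem.Int.toStr year

-- ===== PRECONDITION & SPEC =====
def Spec_dayOfProgrammer (year : Int) (out : String) : Prop := out = dayOfProgrammer_alt year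
instance (year : Int) (out : String) : Decidable (Spec_dayOfProgrammer year out) := by unfold Spec_dayOfProgrammer; infer_instance

-- ===== CLAIM (what is proved, stated in full; the proofs are below) =====
def Claim_equal_dayOfProgrammer : Prop := ∀ (year : Int), Dom_dayOfProgrammer year → Spec_dayOfProgrammer year (dayOfProgrammer year)

-- ===== LEMMAS AND PROOFS =====
theorem checkLeapYear_cases (year : Int) :
    checkLeapYear year = 0 ∨ checkLeapYear year = 1 ∨ checkLeapYear year = 2 := by
  unfold checkLeapYear
  split_ifs <;> simp

-- ===== VERDICT (by name: the statement is the Claim_ definition above) =====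
theorem dayOfProgrammer_spec : Claim_equal_dayOfProgrammer := by
  intro year _
  unfold Spec_dayOfProgrammer
  rcases checkLeapYear_cases year with h | h | h <;>
    simp only [dayOfProgrammer, dayOfProgrammer_alt, h] <;> rfl
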